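-- pv_equiv track=rewrite | github.com/vunguyen1408/no-more-weekend | label_visualize/all_data_content/predict.py | label_relationship_bigger_percent
-- ===== SOURCE A (Python) =====
-- def label_relationship_bigger_percent(list_bigger, lable_unique, arr_relationship):
--     # Duyet trong all label
--     label_relationship = []
--     for label in lable_unique:
--         # Neu khong thuoc list > percent
--         if label not in list_bigger:
--             # Get index
--             i = lable_unique.index(label)
--             # Duyet tai dong index
--             for j in range(len(lable_unique)):
--                 # Neu co lien ket
--                 if arr_relationship[i][j] != 0:
--                     # Label lien ket do co thuoc list label > percent
--                     if lable_unique[j] in list_bigger: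
--                         label_relationship.append(label)
--                         break
--     return label_relationship
-- ===== SOURCE B (Python) =====
-- def label_relationship_bigger_percent(list_bigger, lable_unique, arr_relationship):
--     big = set(list_bigger)
--     # phase 1: the set of column positions belonging to bigger labels
--     bcols = {j for j, lab in enumerate(lable_unique) if lab in big}
--     # phase 2: one row-major pass over the whole matrix, marking the rows that are
--     # linked (nonzero entry) to any bigger-label column
--     linked_rows = set()
--     for i, row in enumerate(arr_relationship):
--         if any(v != 0 and j in bcols for j, v in enumerate(row)):
--             linked_rows.add(i)
--     # phase 3: first-occurrence position of each label (agrees with list.index)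
--     first_idx = {}
--     for i, lab in enumerate(lable_unique):
--         if lab not in first_idx:
--             first_idx[lab] = i
--     # phase 4: keep, in order, the non-bigger labels whose first-occurrence row was marked
--     return [lab for lab in lable_unique
--             if lab not in big and first_idx[lab] in linked_rows]
-- ===== Notes on version B (the rewrite author's own statement) =====
-- stated objective: alternative
-- what changed: B replaces A's per-label row scan (with .index and an early break) by a staged algorithm: it precomputes the set of bigger-label column positions, makes one row-major pass over the whole matrix marking the set of rows linked to any bigger column, records each label's first-occurrence position, and finally keeps the non-bigger labels whose first-occurrence row was marked.
import Mathlib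
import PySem

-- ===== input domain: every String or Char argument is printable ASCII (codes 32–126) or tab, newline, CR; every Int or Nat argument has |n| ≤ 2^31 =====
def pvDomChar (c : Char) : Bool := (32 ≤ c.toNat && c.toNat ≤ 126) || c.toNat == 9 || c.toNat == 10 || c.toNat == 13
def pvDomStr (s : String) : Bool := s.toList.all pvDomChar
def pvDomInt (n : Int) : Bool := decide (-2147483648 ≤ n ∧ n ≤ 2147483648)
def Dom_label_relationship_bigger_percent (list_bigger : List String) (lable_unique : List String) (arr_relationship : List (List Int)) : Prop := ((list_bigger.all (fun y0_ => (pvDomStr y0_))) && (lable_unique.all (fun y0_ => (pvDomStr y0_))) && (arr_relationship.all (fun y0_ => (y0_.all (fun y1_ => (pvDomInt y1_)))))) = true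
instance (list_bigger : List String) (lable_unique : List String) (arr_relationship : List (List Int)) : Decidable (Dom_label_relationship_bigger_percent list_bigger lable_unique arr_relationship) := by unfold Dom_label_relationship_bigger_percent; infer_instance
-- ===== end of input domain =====

-- B is a staged column-major algorithm: mark the set of rows linked to any bigger-label
-- column, then keep the non-bigger labels whose first-occurrence row was marked
-- (objective: alternative algorithm, same result, no speed claim).

-- ===== PORT A =====
-- inner 'for j in range(len(lable_unique)): if arr[i][j] != 0: if lable_unique[j] in list_bigger: … break'
-- (indexing totalized with pyGetD; exact under Pre_, where every access is in range)
def pvFindA (arr : List (List Int)) (list_bigger lable_unique : List String) (i : Int) : List Int → Bool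
  | [] => false
  | j :: rest =>
    if PySem.List.pyGetD (PySem.List.pyGetD arr i []) j 0 ≠ 0 then
      if list_bigger.contains (PySem.List.pyGetD lable_unique j "") then true
      else pvFindA arr list_bigger lable_unique i rest
    else pvFindA arr list_bigger lable_unique i rest

def label_relationship_bigger_percent (list_bigger : List String) (lable_unique : List String) (arr_relationship : List (List Int)) : List String :=
  lable_unique.foldl (fun acc label =>
    if !(list_bigger.contains label) then
      -- i = lable_unique.index(label); label is always a member, so ValueError cannot occur
      let i : Int := ((PySem.List.index? lable_unique label).getD 0 : Nat)
      if pvFindA arr_relationship list_bigger lable_unique i (PySem.List.pyRange 0 (PySem.List.len lable_unique) 1)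
      then acc ++ [label] else acc
    else acc) []

-- ===== PORT B =====
-- phase 1: bcols = {j for j, lab in enumerate(lable_unique) if lab in big}
def pvBCols (big : PySem.Set String) (lable_unique : List String) : PySem.Set Int :=
  PySem.Set.ofList (((PySem.List.enumerate lable_unique 0).filter (fun p => big.contains p.2)).map (fun p => p.1))

-- phase 2: linked_rows = set(); for i, row in enumerate(arr_relationship):
--   if any(v != 0 and j in bcols for j, v in enumerate(row)): linked_rows.add(i)
def pvLinkedRows (bcols : PySem.Set Int) (arr : List (List Int)) : PySem.Set Int :=
  (PySem.List.enumerate arr 0).foldl (fun s q =>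
    if (PySem.List.enumerate q.2 0).any (fun p => decide (p.2 ≠ 0) && bcols.contains p.1)
    then PySem.Set.add s q.1 else s) PySem.Set.empty

-- phase 3: first_idx = {}; for i, lab in enumerate(lable_unique): if lab not in first_idx: first_idx[lab] = i
def pvFirstIdx (lable_unique : List String) : PySem.Dict String Int :=
  (PySem.List.enumerate lable_unique 0).foldl
    (fun d p => if d.contains p.2 then d else d.insert p.2 p.1) PySem.Dict.empty

-- phase 4: the list comprehension keeping the marked non-bigger labels in order
def label_relationship_bigger_percent_alt (list_bigger : List String) (lable_unique : List String) (arr_relationship : List (List Int)) : List String :=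
  let big : PySem.Set String := PySem.Set.ofList list_bigger
  let bcols := pvBCols big lable_unique
  let linked := pvLinkedRows bcols arr_relationship
  let firstIdx := pvFirstIdx lable_unique
  lable_unique.filter (fun lab => !big.contains lab && linked.contains (firstIdx.getD lab 0))

-- ===== PRECONDITION & SPEC =====
-- Pre_ is exactly the domain where A returns normally (no IndexError): for the first
-- occurrence (row k) of each label not in list_bigger, that row exists and either spans
-- all len(lable_unique) columns or contains a linking hit (nonzero entry in a bigger-label
-- column) before its end, so the scan breaks before running off the row.
def Pre_label_relationship_bigger_percent (list_bigger : List String) (lable_unique : List String) (arr_relationship : List (List Int)) : Prop :=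
  ∀ k ∈ List.range lable_unique.length,
    (lable_unique.getD k "" ∉ list_bigger ∧
      ∀ k' ∈ List.range k, lable_unique.getD k' "" ≠ lable_unique.getD k "") →
    k < arr_relationship.length ∧
      (lable_unique.length ≤ (arr_relationship.getD k []).length ∨
        ∃ j ∈ List.range (min lable_unique.length (arr_relationship.getD k []).length),
          (arr_relationship.getD k []).getD j 0 ≠ 0 ∧ lable_unique.getD j "" ∈ list_bigger)
instance (list_bigger : List String) (lable_unique : List String) (arr_relationship : List (List Int)) : Decidable (Pre_label_relationship_bigger_percent list_bigger lable_unique arr_relationship) := by unfold Pre_label_relationship_bigger_percent; infer_instance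

def pvWitness_label_relationship_bigger_percent : List String × List String × List (List Int) :=
  (["a"], ["a", "b"], [[0, 1], [1, 0]])

def Spec_label_relationship_bigger_percent (list_bigger : List String) (lable_unique : List String) (arr_relationship : List (List Int)) (out : List String) : Prop := out = label_relationship_bigger_percent_alt list_bigger lable_unique arr_relationship
instance (list_bigger : List String) (lable_unique : List String) (arr_relationship : List (List Int)) (out : List String) : Decidable (Spec_label_relationship_bigger_percent list_bigger lable_unique arr_relationship out) := by unfold Spec_label_relationship_bigger_percent; infer_instance

-- ===== CLAIM (what is proved, stated in full; the proofs are below) =====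
def Claim_equal_label_relationship_bigger_percent : Prop := ∀ (list_bigger : List String) (lable_unique : List String) (arr_relationship : List (List Int)), Dom_label_relationship_bigger_percent list_bigger lable_unique arr_relationship → Pre_label_relationship_bigger_percent list_bigger lable_unique arr_relationship → Spec_label_relationship_bigger_percent list_bigger lable_unique arr_relationship (label_relationship_bigger_percent list_bigger lable_unique arr_relationship)

-- ===== LEMMAS AND PROOFS =====

-- set(list_bigger) membership agrees with 'in list_bigger'
lemma pv_set_contains (lb : List String) (x : String) :
    (PySem.Set.ofList lb).contains x = lb.contains x := by
  by_cases h : x ∈ lb <;>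
    simp [PySem.Set.contains_eq_listContains, h, PySem.Set.mem_ofList]

-- the first-occurrence dict agrees with list.index
lemma pv_firstIdx_aux (lu : List String) (x : String) : ∀ (s : Int) (d : PySem.Dict String Int),
    ((PySem.List.enumerate lu s).foldl (fun d p => if d.contains p.2 then d else d.insert p.2 p.1) d).getD x 0
      = if d.contains x then d.getD x 0
        else (match PySem.List.index? lu x with
              | some k => s + (k : Int)
              | none => 0) := by
  induction lu with
  | nil =>
    intro s d
    rw [(PySem.List.index?_eq_none_iff [] x).mpr (List.not_mem_nil)]
    simp only [PySem.List.enumerate, List.foldl_nil]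
    by_cases hd : d.contains x
    · simp [hd]
    · simp only [hd, Bool.false_eq_true, if_false]
      exact PySem.Dict.getD_of_not_contains d 0 (by simpa using hd)
  | cons y t ih =>
    intro s d
    simp only [PySem.List.enumerate, List.foldl_cons]
    rw [ih]
    by_cases hxy : x = y
    · subst hxy
      by_cases hd : d.contains x
      · simp [hd]
      · rw [PySem.List.index?_cons_self]
        simp [hd, PySem.Dict.getD_insert_self]
    · rw [PySem.List.index?_cons_of_ne t (Ne.symm hxy)]
      by_cases hd : d.contains x
      · have hc : (if d.contains y then d else d.insert y s).contains x = true := by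
          split
          · exact hd
          · simp [PySem.Dict.contains_insert, hd]
        simp only [hd, hc, if_pos]
        split
        · rfl
        · exact PySem.Dict.getD_insert_of_ne _ _ _ hxy
      · have hc : (if d.contains y then d else d.insert y s).contains x = false := by
          split
          · simpa using hd
          · simp [PySem.Dict.contains_insert, hd, hxy]
        simp only [hd, hc, Bool.false_eq_true, if_false]
        cases PySem.List.index? t x with
        | none => simp
        | some k => push_cast; simp; ring

lemma pv_firstIdx_getD (lu : List String) (x : String) (k : Nat)
    (hk : PySem.List.index? lu x = some k) :
    (pvFirstIdx lu).getD x 0 = (k : Int) := by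
  unfold pvFirstIdx
  rw [pv_firstIdx_aux, hk]
  simp [PySem.Dict.contains_empty]

-- A's inner break-loop is an any() of the conjunction
lemma pv_findA_any (arr : List (List Int)) (lb lu : List String) (i : Int) (js : List Int) :
    pvFindA arr lb lu i js
      = js.any (fun j => decide (PySem.List.pyGetD (PySem.List.pyGetD arr i []) j 0 ≠ 0)
                          && lb.contains (PySem.List.pyGetD lu j "")) := by
  induction js with
  | nil => simp [pvFindA]
  | cons j rest ih =>
    simp only [pvFindA, List.any_cons, ← ih]
    by_cases h1 : PySem.List.pyGetD (PySem.List.pyGetD arr i []) j 0 ≠ 0 <;>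
      by_cases h2 : lb.contains (PySem.List.pyGetD lu j "") <;> simp [h1]

-- membership in a fold that conditionally adds g x to the set
lemma pv_contains_foldl_add {α : Type} (l : List α) (f : α → Bool) (g : α → Int)
    (s : PySem.Set Int) (i : Int) :
    (l.foldl (fun s x => if f x then PySem.Set.add s (g x) else s) s).contains i
      = (s.contains i || l.any (fun x => f x && g x == i)) := by
  induction l generalizing s with
  | nil => simp
  | cons x t ih =>
    simp only [List.foldl_cons, List.any_cons, ih]
    by_cases hf : f x
    · simp [hf, Bool.or_assoc, Bool.beq_comm, Bool.beq_eq_decide_eq]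
    · simp [hf]

lemma pv_linked_contains (bcols : PySem.Set Int) (arr : List (List Int)) (i : Int) :
    (pvLinkedRows bcols arr).contains i
      = (PySem.List.enumerate arr 0).any (fun q =>
          ((PySem.List.enumerate q.2 0).any (fun p => decide (p.2 ≠ 0) && bcols.contains p.1)) && q.1 == i) := by
  unfold pvLinkedRows
  rw [pv_contains_foldl_add]
  simp [PySem.Set.empty]

lemma pv_bcols_contains (lb lu : List String) (j : Int) :
    ((pvBCols (PySem.Set.ofList lb) lu).contains j = true)
      ↔ ∃ m : Nat, ∃ _ : m < lu.length, j = (m : Int) ∧ lu[m] ∈ lb := by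
  unfold pvBCols
  rw [PySem.Set.contains_eq_listContains]
  simp only [List.contains_iff_mem, PySem.Set.mem_ofList, List.mem_map, List.mem_filter,
    PySem.List.mem_enumerate_iff]
  constructor
  · rintro ⟨p, ⟨⟨m, hm, rfl⟩, hbig⟩, rfl⟩
    refine ⟨m, hm, by simp, ?_⟩
    simpa [PySem.Set.contains_eq_listContains, PySem.Set.mem_ofList] using hbig
  · rintro ⟨m, hm, rfl, hmem⟩
    exact ⟨(0 + (m : Int), lu[m]), ⟨⟨m, hm, rfl⟩,
      by simpa [PySem.Set.contains_eq_listContains, PySem.Set.mem_ofList] using hmem⟩, by simp⟩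

-- the combined double-any equals A's per-row any for row k
lemma pv_cond_eq (arr : List (List Int)) (lb lu : List String) (k : Nat) :
    (PySem.List.enumerate arr 0).any (fun q =>
        ((PySem.List.enumerate q.2 0).any (fun p => decide (p.2 ≠ 0) && (pvBCols (PySem.Set.ofList lb) lu).contains p.1)) && q.1 == (k : Int))
      = (PySem.List.pyRange 0 (PySem.List.len lu) 1).any
          (fun j => decide (PySem.List.pyGetD (PySem.List.pyGetD arr (k : Int) []) j 0 ≠ 0)
                     && lb.contains (PySem.List.pyGetD lu j "")) := by
  rw [Bool.eq_iff_iff]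
  simp only [List.any_eq_true, PySem.List.mem_enumerate_iff, Bool.and_eq_true, decide_eq_true_eq,
    beq_iff_eq, PySem.List.pyGetD_natCast]
  constructor
  · rintro ⟨q, ⟨r, hr, rfl⟩, ⟨p, ⟨m, hm, rfl⟩, hv, hbc⟩, hrk⟩
    have hrk' : r = k := by simpa using hrk
    subst hrk'
    obtain ⟨m', hm', hmm, hlu⟩ := (pv_bcols_contains lb lu _).mp hbc
    have hmm' : m = m' := by simpa using hmm
    subst hmm'
    refine ⟨(m : Int), ?_, ?_, ?_⟩
    · rw [PySem.List.mem_pyRange_one]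
      constructor
      · positivity
      · simp only [PySem.List.len]; exact_mod_cast hm'
    · have hm2 : m < arr[r].length := by simpa using hm
      rw [PySem.List.pyGetD_natCast, List.getD_eq_getElem _ _ hr, List.getD_eq_getElem _ _ hm2]
      simpa using hv
    · rw [PySem.List.pyGetD_natCast, List.getD_eq_getElem _ _ hm']
      simpa [List.contains_iff_mem] using hlu
  · rintro ⟨j, hj, hval, hbig⟩
    have hj0 : 0 ≤ j := (PySem.List.mem_pyRange_one.mp hj).1
    have hjlt : j < (lu.length : Int) := by
      have := (PySem.List.mem_pyRange_one.mp hj).2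
      simpa [PySem.List.len] using this
    obtain ⟨m, rfl⟩ := Int.eq_ofNat_of_zero_le hj0
    have hmlu : m < lu.length := by exact_mod_cast hjlt
    rw [PySem.List.pyGetD_natCast] at hval
    have hk : k < arr.length := by
      by_contra hk
      rw [List.getD_eq_default _ _ (Nat.le_of_not_lt hk)] at hval
      simp [List.getD] at hval
    rw [List.getD_eq_getElem _ _ hk] at hval
    have hmrow : m < arr[k].length := by
      by_contra hm
      rw [List.getD_eq_default _ _ (Nat.le_of_not_lt hm)] at hval
      exact hval rfl
    rw [List.getD_eq_getElem _ _ hmrow] at hval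
    rw [PySem.List.pyGetD_natCast, List.getD_eq_getElem _ _ hmlu] at hbig
    refine ⟨(0 + (k : Int), arr[k]), ⟨k, hk, rfl⟩,
      ⟨(0 + (m : Int), arr[k][m]), ⟨m, hmrow, rfl⟩, by simpa using hval,
        (pv_bcols_contains lb lu _).mpr ⟨m, hmlu, by simp, by simpa using hbig⟩⟩, by simp⟩

-- ===== VERDICT (by name: the statement is the Claim_ definition above) =====
theorem label_relationship_bigger_percent_spec : Claim_equal_label_relationship_bigger_percent := by
  intro lb lu arr _ _
  unfold Spec_label_relationship_bigger_percent
  unfold label_relationship_bigger_percent label_relationship_bigger_percent_alt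
  simp only []
  rw [PySem.List.foldl_congr_mem lu _
    (fun acc label =>
      if !(lb.contains label) && pvFindA arr lb lu ((PySem.List.index? lu label).getD 0 : Nat)
          (PySem.List.pyRange 0 (PySem.List.len lu) 1)
      then acc ++ [label] else acc) []
    (by
      intro acc label _
      by_cases hb : label ∈ lb
      · simp [hb]
      · simp [hb])]
  rw [PySem.List.foldl_append_if_eq_filter]
  rw [List.nil_append]
  refine List.filter_congr ?_
  intro label hmem
  obtain ⟨k, hk⟩ := Option.isSome_iff_exists.mp ((PySem.List.index?_isSome_iff lu label).mpr hmem)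
  rw [pv_set_contains, pv_firstIdx_getD lu label k hk, hk, pv_linked_contains, pv_cond_eq]
  simp only [Option.getD_some]
  congr 1
  exact pv_findA_any arr lb lu _ _
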